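-- pv_equiv track=rewrite | github.com/QingFengByte/flocks | flocks/tool/file/doc_parser.py | _normalize_fenced_block
-- ===== SOURCE A (Python) =====
-- def _normalize_fenced_block(text: str) -> str:
--     lines = [line.rstrip() for line in text.splitlines()]
--     while lines and not lines[0].strip():
--         lines.pop(0)
--     while lines and not lines[-1].strip():
--         lines.pop()
--     if not lines:
--         return ""
--     return "\n".join(lines) + "\n\n"
-- ===== SOURCE B (Python) =====
-- def _normalize_fenced_block(text: str) -> str:
--     body = "\n".join(line.rstrip() for line in text.splitlines()).strip("\n")
--     return body + "\n\n" if body else ""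
-- ===== Notes on version B (the rewrite author's own statement) =====
-- stated objective: simpler
-- what changed: A trims blank boundary lines with two while/pop loops over the split line list before joining; B joins the rstripped lines first and removes the leading/trailing blank lines in one string-level strip of newline characters on the joined text.
import Mathlib
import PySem

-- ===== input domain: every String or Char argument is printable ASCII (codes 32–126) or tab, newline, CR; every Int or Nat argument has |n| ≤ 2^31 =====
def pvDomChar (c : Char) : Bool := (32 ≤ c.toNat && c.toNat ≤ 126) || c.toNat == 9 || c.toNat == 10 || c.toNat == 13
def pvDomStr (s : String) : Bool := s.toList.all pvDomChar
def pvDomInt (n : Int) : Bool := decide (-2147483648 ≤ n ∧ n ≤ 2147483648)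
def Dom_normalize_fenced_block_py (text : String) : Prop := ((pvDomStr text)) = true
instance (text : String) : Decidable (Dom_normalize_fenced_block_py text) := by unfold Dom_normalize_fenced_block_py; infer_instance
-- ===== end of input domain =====

-- B replaces A's two boundary while/pop loops with a single string-level .strip('\n') over the joined text (objective: simpler).

-- ===== PORT A =====
-- while lines and not lines[0].strip(): lines.pop(0)
def pvPopFront : List (List Char) → List (List Char)
  | [] => []
  | l :: ls => if PySem.Chars.strip l = [] then pvPopFront ls else l :: ls

-- while lines and not lines[-1].strip(): lines.pop()
def pvPopBack (ls : List (List Char)) : List (List Char) :=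
  if h : ls = [] then []
  else if PySem.Chars.strip (ls.getLast h) = [] then pvPopBack ls.dropLast else ls
termination_by ls.length
decreasing_by
  have : ls.length ≠ 0 := fun h0 => h (List.length_eq_zero_iff.mp h0)
  simp [List.length_dropLast]; omega

def normalize_fenced_block_py (text : String) : String :=
  let lines := (PySem.Chars.splitlines text.toList).map PySem.Chars.rstrip
  let lines := pvPopFront lines
  let lines := pvPopBack lines
  if lines = [] then ""
  else String.ofList (PySem.Chars.join ['\n'] lines ++ ['\n', '\n'])

-- ===== PORT B =====
def normalize_fenced_block_py_alt (text : String) : String :=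
  let body := PySem.Chars.stripChars
      (PySem.Chars.join ['\n'] ((PySem.Chars.splitlines text.toList).map PySem.Chars.rstrip)) ['\n']
  if body = [] then "" else String.ofList (body ++ ['\n', '\n'])

-- ===== PRECONDITION & SPEC =====
def Spec_normalize_fenced_block_py (text : String) (out : String) : Prop := out = normalize_fenced_block_py_alt text
instance (text : String) (out : String) : Decidable (Spec_normalize_fenced_block_py text out) := by unfold Spec_normalize_fenced_block_py; infer_instance

-- ===== CLAIM (what is proved, stated in full; the proofs are below) =====
def Claim_equal_normalize_fenced_block_py : Prop := ∀ (text : String), Dom_normalize_fenced_block_py text → Spec_normalize_fenced_block_py text (normalize_fenced_block_py text)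

-- ===== LEMMAS AND PROOFS =====

-- the '\n'-strip predicate used by stripChars with chars = ['\n']
def pvNl (c : Char) : Bool := (['\n'] : List Char).contains c

-- pieces produced by splitlines.go contain no break character
theorem pv_go_no_break (isB : Char → Bool) (s cur : List Char) (acc : List (List Char))
    (hcur : ∀ c ∈ cur, isB c = false) (hacc : ∀ l ∈ acc, ∀ c ∈ l, isB c = false) :
    ∀ l ∈ PySem.Chars.splitlines.go isB s cur acc, ∀ c ∈ l, isB c = false := by
  fun_induction PySem.Chars.splitlines.go isB s cur acc with
  | case1 cur acc h =>
    intro l hl c hc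
    simp only [h] at *
    exact hacc l (List.mem_reverse.mp hl) c hc
  | case2 cur acc h =>
    intro l hl c hc
    rw [List.mem_reverse] at hl
    rcases List.mem_cons.mp hl with rfl | hl
    · exact hcur c (List.mem_reverse.mp hc)
    · exact hacc l hl c hc
  | case3 rest cur acc ih =>
    exact ih (by simp) (by
      intro l hl c hc
      rcases List.mem_cons.mp hl with rfl | hl
      · exact hcur c (List.mem_reverse.mp hc)
      · exact hacc l hl c hc)
  | case4 c rest cur acc hne h1 ih =>
    exact ih (by simp) (by
      intro l hl d hd
      rcases List.mem_cons.mp hl with rfl | hl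
      · exact hcur d (List.mem_reverse.mp hd)
      · exact hacc l hl d hd)
  | case5 c rest cur acc hne h1 ih =>
    refine ih ?_ hacc
    intro d hd
    rcases List.mem_cons.mp hd with rfl | hd
    · exact Bool.of_not_eq_true h1
    · exact hcur d hd

theorem pv_splitlines_no_nl (s : List Char) :
    ∀ l ∈ PySem.Chars.splitlines s, ('\n' : Char) ∉ l := by
  intro l hl hc
  unfold PySem.Chars.splitlines at hl
  have := pv_go_no_break _ _ _ _ (by simp) (by simp) l hl '\n' hc
  simp at this

-- rstrip only removes characters, so membership descends
theorem pv_mem_rstrip {c : Char} {l : List Char} (h : c ∈ PySem.Chars.rstrip l) : c ∈ l := by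
  unfold PySem.Chars.rstrip at h
  rw [List.mem_reverse] at h
  exact List.mem_reverse.mp ((List.dropWhile_sublist _).subset h)

-- strip of an rstripped line is empty iff the rstripped line is empty
theorem pv_strip_rstrip_nil_iff (x : List Char) :
    PySem.Chars.strip (PySem.Chars.rstrip x) = [] ↔ PySem.Chars.rstrip x = [] := by
  constructor
  · intro h
    by_contra hne
    set p := PySem.Chars.isspace with hp
    set y := PySem.Chars.rstrip x with hy
    have hdy : y.getLast? = some (y.getLast hne) := List.getLast?_eq_some_getLast hne
    set d := y.getLast hne with hdd
    have hrev : y.reverse = List.dropWhile p x.reverse := by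
      rw [hy]; unfold PySem.Chars.rstrip; rw [List.reverse_reverse]
    have hdw : List.dropWhile p x.reverse ≠ [] := by
      intro h0; apply hne; have := congrArg List.reverse hrev; simp [h0] at this; simpa using this
    have hdns : p d = false := by
      have hhead := List.head_dropWhile_not p hdw
      have : (List.dropWhile p x.reverse).head? = some d := by
        rw [← hrev, List.head?_reverse, hdy]
      rw [List.head?_eq_some_head hdw] at this
      injection this with h'
      rw [h'] at hhead; exact hhead
    have hstrip : List.dropWhile p (List.dropWhile p y).reverse = [] := by
      unfold PySem.Chars.strip PySem.Chars.rstrip PySem.Chars.lstrip at h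
      have := congrArg List.reverse h
      simpa using this
    have hall := List.dropWhile_eq_nil_iff.mp hstrip
    have hdn : List.dropWhile p y ≠ [] := by
      intro h0
      have := List.dropWhile_eq_nil_iff.mp h0
      have hdmem : d ∈ y := List.mem_of_getLast? hdy
      rw [this d hdmem] at hdns; simp at hdns
    have hlast : (List.dropWhile p y).getLast? = some d := by
      have h1 : (List.takeWhile p y ++ List.dropWhile p y).getLast? = (List.dropWhile p y).getLast? := List.getLast?_append_of_ne_nil _ hdn
      rw [List.takeWhile_append_dropWhile] at h1
      rw [← h1, hdy]
    have : d ∈ (List.dropWhile p y).reverse := by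
      rw [List.mem_reverse]; exact List.mem_of_getLast? hlast
    rw [hall d this] at hdns; simp at hdns
  · intro h; rw [h]; rfl

-- A's first loop is dropWhile isEmpty, given blank ↔ empty on the elements
theorem pv_popFront_eq (ls : List (List Char))
    (h : ∀ l ∈ ls, (PySem.Chars.strip l = [] ↔ l = [])) :
    pvPopFront ls = ls.dropWhile (·.isEmpty) := by
  induction ls with
  | nil => rfl
  | cons l ls ih =>
    rw [pvPopFront, List.dropWhile_cons]
    by_cases hb : l = []
    · subst hb
      simp only [List.isEmpty_nil, if_pos ((h [] (by simp)).mpr rfl), if_true]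
      exact ih (fun x hx => h x (by simp [hx]))
    · rw [if_neg (fun hs => hb ((h l (by simp)).mp hs)),
        if_neg (by simp [List.isEmpty_iff, hb])]

-- A's second loop is reverse-dropWhile isEmpty, given blank ↔ empty on the elements
theorem pv_popBack_eq (ls : List (List Char))
    (h : ∀ l ∈ ls, (PySem.Chars.strip l = [] ↔ l = [])) :
    pvPopBack ls = (ls.reverse.dropWhile (·.isEmpty)).reverse := by
  induction ls using List.reverseRecOn with
  | nil => rw [pvPopBack]; rfl
  | append_singleton xs x ih =>
    rw [pvPopBack]
    have hne : xs ++ [x] ≠ [] := by simp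
    rw [dif_neg hne]
    have hlast : (xs ++ [x]).getLast hne = x := by simp
    rw [hlast, List.reverse_append]
    simp only [List.reverse_cons, List.reverse_nil, List.nil_append, List.cons_append,
      List.dropWhile_cons]
    by_cases hb : x = []
    · subst hb
      rw [if_pos ((h [] (by simp)).mpr rfl), List.dropLast_concat,
        if_pos (by simp)]
      exact ih (fun l hl => h l (by simp [hl]))
    · rw [if_neg (fun hs => hb ((h x (by simp)).mp hs)),
        if_neg (by simp [List.isEmpty_iff, hb])]
      simp

theorem pv_intercalate_cons_cons (sep x y : List Char) (zs : List (List Char)) :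
    List.intercalate sep (x :: y :: zs) = x ++ sep ++ List.intercalate sep (y :: zs) := by
  simp [List.intercalate]

theorem pv_intercalate_concat (sep x : List Char) (xs : List (List Char)) (h : xs ≠ []) :
    List.intercalate sep (xs ++ [x]) = List.intercalate sep xs ++ sep ++ x := by
  induction xs with
  | nil => exact absurd rfl h
  | cons y ys ih =>
    cases ys with
    | nil => simp [List.intercalate]
    | cons z zs =>
      have ih' := ih (by simp)
      rw [List.cons_append] at ih'
      rw [List.cons_append, List.cons_append, pv_intercalate_cons_cons, ih',
        pv_intercalate_cons_cons]
      simp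

-- a dropWhile that starts at the last char of a newline-free nonempty line keeps everything
theorem pv_dropWhile_keep (l r : List Char) (hne : l ≠ []) (hnn : ('\n' : Char) ∉ l) :
    List.dropWhile pvNl (l.reverse ++ r) = l.reverse ++ r := by
  obtain ⟨d, ds, hd⟩ : ∃ d ds, l.reverse = d :: ds := by
    cases hl : l.reverse with
    | nil => exact absurd (by simpa using congrArg List.reverse hl) hne
    | cons d ds => exact ⟨d, ds, rfl⟩
  have hdl : d ∈ l := by rw [← List.mem_reverse, hd]; simp
  have hdn : d ≠ '\n' := fun he => hnn (he ▸ hdl)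
  rw [hd, List.cons_append, List.dropWhile_cons, if_neg (by simp [pvNl, hdn])]

-- front strip of the joined text = join of the front-dropped list
theorem pv_front (ls : List (List Char)) (h : ∀ l ∈ ls, ('\n' : Char) ∉ l) :
    List.dropWhile pvNl (List.intercalate ['\n'] ls)
      = List.intercalate ['\n'] (ls.dropWhile (·.isEmpty)) := by
  induction ls with
  | nil => rfl
  | cons l ls ih =>
    by_cases hb : l = []
    · subst hb
      rw [List.dropWhile_cons, if_pos (by simp)]
      cases ls with
      | nil => rfl
      | cons m ms =>
        rw [pv_intercalate_cons_cons]
        simp only [List.nil_append, List.singleton_append]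
        rw [List.dropWhile_cons, if_pos (by simp [pvNl])]
        exact ih (fun x hx => h x (by simp [hx]))
    · obtain ⟨c, t, rfl⟩ : ∃ c t, l = c :: t := by
        cases l with | nil => exact absurd rfl hb | cons c t => exact ⟨c, t, rfl⟩
      have hcn : c ≠ '\n' := by
        intro he; exact h (c :: t) (by simp) (by simp [he])
      rw [List.dropWhile_cons, if_neg (by simp)]
      cases ls with
      | nil =>
        have hx : List.intercalate ['\n'] [c :: t] = c :: t := by simp [List.intercalate]
        rw [hx, List.dropWhile_cons, if_neg (by simp [pvNl, hcn])]
      | cons m ms =>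
        rw [pv_intercalate_cons_cons, List.cons_append, List.cons_append,
          List.dropWhile_cons, if_neg (by simp [pvNl, hcn])]

-- back strip of the joined text = join of the back-dropped list
theorem pv_back (ms : List (List Char)) (h : ∀ l ∈ ms, ('\n' : Char) ∉ l) :
    (List.dropWhile pvNl (List.intercalate ['\n'] ms).reverse).reverse
      = List.intercalate ['\n'] ((ms.reverse.dropWhile (·.isEmpty)).reverse) := by
  induction ms using List.reverseRecOn with
  | nil => rfl
  | append_singleton xs x ih =>
    have hrev : (xs ++ [x]).reverse = x :: xs.reverse := by simp
    rw [hrev]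
    by_cases hb : x = []
    · subst hb
      rw [List.dropWhile_cons, if_pos (by simp)]
      by_cases hxs : xs = []
      · subst hxs; rfl
      · rw [pv_intercalate_concat _ _ _ hxs, List.append_nil, List.reverse_append,
          List.reverse_cons, List.reverse_nil, List.nil_append, List.singleton_append,
          List.dropWhile_cons, if_pos (by simp [pvNl])]
        exact ih (fun l hl => h l (by simp [hl]))
    · have hnn : ('\n' : Char) ∉ x := h x (by simp)
      rw [List.dropWhile_cons, if_neg (by simp [List.isEmpty_iff, hb])]
      rw [List.reverse_cons, List.reverse_reverse]
      by_cases hxs : xs = []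
      · subst hxs
        simp only [List.nil_append]
        have hint : List.intercalate ['\n'] [x] = x := by simp [List.intercalate]
        rw [hint]
        have hkeep := pv_dropWhile_keep x [] hb hnn
        rw [List.append_nil] at hkeep
        rw [hkeep, List.reverse_reverse]
      · rw [pv_intercalate_concat _ _ _ hxs]
        have hsh : (List.intercalate ['\n'] xs ++ ['\n'] ++ x).reverse
            = x.reverse ++ ('\n' :: (List.intercalate ['\n'] xs).reverse) := by simp
        rw [hsh, pv_dropWhile_keep x _ hb hnn]
        simp

-- the two programs agree for any line list with newline-free lines whose blank test is emptiness
theorem pv_main (ls : List (List Char))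
    (H1 : ∀ l ∈ ls, ('\n' : Char) ∉ l)
    (H2 : ∀ l ∈ ls, (PySem.Chars.strip l = [] ↔ l = [])) :
    (if pvPopBack (pvPopFront ls) = [] then ""
     else String.ofList (PySem.Chars.join ['\n'] (pvPopBack (pvPopFront ls)) ++ ['\n', '\n']))
    = (if PySem.Chars.stripChars (PySem.Chars.join ['\n'] ls) ['\n'] = [] then ""
       else String.ofList (PySem.Chars.stripChars (PySem.Chars.join ['\n'] ls) ['\n'] ++ ['\n', '\n'])) := by
  have hpf : pvPopFront ls = ls.dropWhile (·.isEmpty) := pv_popFront_eq ls H2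
  have hpb : pvPopBack (ls.dropWhile (·.isEmpty))
      = (((ls.dropWhile (·.isEmpty)).reverse).dropWhile (·.isEmpty)).reverse :=
    pv_popBack_eq _ (fun l hl => H2 l ((List.dropWhile_sublist _).subset hl))
  have hbody : PySem.Chars.stripChars (PySem.Chars.join ['\n'] ls) ['\n']
      = List.intercalate ['\n'] ((((ls.dropWhile (·.isEmpty)).reverse).dropWhile (·.isEmpty)).reverse) := by
    show (List.dropWhile pvNl
        ((List.dropWhile pvNl (List.intercalate ['\n'] ls)).reverse)).reverse = _
    rw [pv_front ls H1,
      pv_back _ (fun l hl => H1 l ((List.dropWhile_sublist _).subset hl))]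
  rw [hpf, hpb, hbody]
  by_cases hM : (((ls.dropWhile (·.isEmpty)).reverse).dropWhile (·.isEmpty)).reverse = []
  · rw [if_pos hM, if_pos (by rw [hM]; rfl)]
  · have hMne : List.intercalate ['\n']
        ((((ls.dropWhile (·.isEmpty)).reverse).dropWhile (·.isEmpty)).reverse) ≠ [] := by
      set F := ls.dropWhile (·.isEmpty) with hFdef
      set M := ((F.reverse).dropWhile (·.isEmpty)).reverse with hMdef
      obtain ⟨hh, t, hMeq⟩ : ∃ h t, M = h :: t := by
        cases hMl : M with
        | nil => exact absurd hMl hM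
        | cons a b => exact ⟨a, b, rfl⟩
      have hpre : M <+: F := by
        rw [← List.reverse_suffix, hMdef, List.reverse_reverse]
        exact List.dropWhile_suffix _
      obtain ⟨r, hr⟩ := hpre
      have hFhead : F = hh :: (t ++ r) := by rw [← hr, hMeq]; rfl
      have hx : List.dropWhile (fun x : List Char => x.isEmpty) ls = hh :: (t ++ r) := by
        rw [← hFdef]; exact hFhead
      have hhne : hh ≠ [] := by
        have hw : List.dropWhile (fun x : List Char => x.isEmpty) ls ≠ [] := by
          rw [hx]; simp
        have hq := List.head_dropWhile_not (fun x : List Char => x.isEmpty) hw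
        simp only [hx, List.head_cons] at hq
        exact fun h0 => by simp [h0] at hq
      rw [hMeq]
      cases t with
      | nil => simpa [List.intercalate] using hhne
      | cons u us =>
        rw [pv_intercalate_cons_cons]
        simp [hhne]
    rw [if_neg hM, if_neg hMne]
    rfl

-- ===== VERDICT (by name: the statement is the Claim_ definition above) =====
theorem normalize_fenced_block_py_spec : Claim_equal_normalize_fenced_block_py := by
  intro text _
  have H1 : ∀ l ∈ (PySem.Chars.splitlines text.toList).map PySem.Chars.rstrip,
      ('\n' : Char) ∉ l := by
    intro l hl hc
    obtain ⟨p, hp, rfl⟩ := List.mem_map.mp hl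
    exact pv_splitlines_no_nl _ p hp (pv_mem_rstrip hc)
  have H2 : ∀ l ∈ (PySem.Chars.splitlines text.toList).map PySem.Chars.rstrip,
      (PySem.Chars.strip l = [] ↔ l = []) := by
    intro l hl
    obtain ⟨p, hp, rfl⟩ := List.mem_map.mp hl
    exact pv_strip_rstrip_nil_iff p
  exact pv_main _ H1 H2
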